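-- pv_equiv track=rewrite | github.com/Ricman1029/AED2024 | TP/Trabajo Practico 2/Mi TP/trabajo_practico_2.py | validar_envio
-- ===== SOURCE A (Python) =====
-- def validar_envio(cadena):
--     # Si el envío es válido, retornamos el número 1 para poder sumarlo, sino retornamos 0.
--     hay_mayuscula = hay_letra = hay_palabra_digitos = False
--
--     for car in cadena:
--         # Si estamos analizando una palabra
--         if car != " " and car != ".":
--             # Si la cadena tiene algún caracter que no es ni letra ni digito, el envío NO es válido
--             if not car.isdigit() and not car.isalpha():
--                 return False
--
--             # Si hay dos mayúsculas seguidas, el envío NO es válido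
--             if hay_mayuscula and car.isupper():
--                 return False
--             hay_mayuscula = False
--             # Si el caracter es una mayúscula, levantamos una bandera
--             if car.isupper():
--                 hay_mayuscula = True
--
--             # Si hay una letra en la palabra, levantamos una bandera
--             if car.isalpha():
--                 hay_letra = True
--
--         # Si car es un espacio, significa que terminó una palabra
--         elif car == " " or car == ".":
--             # Si la palabra que terminó estaba compuesta solo por dígitos, levantamos una bandera
--             if not hay_letra:
--                 hay_palabra_digitos = True
--
--             # Reseteamos el resto de las variables ya que empieza una nueva palabra
--             hay_mayuscula = hay_letra = False
--
--         # Si car es un punto, significa que terminó la dirección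
--         elif car == ".":
--             if not hay_palabra_digitos:
--                 return False
--
--     return True
-- ===== SOURCE B (Python) =====
-- def validar_envio(cadena):
--     if not all(c.isdigit() or c.isalpha() or c in " ." for c in cadena):
--         return False
--     return not any(a.isupper() and b.isupper() for a, b in zip(cadena, cadena[1:]))
-- ===== Notes on version B (the rewrite author's own statement) =====
-- stated objective: simpler
-- what changed: Replaces the stateful single-pass flag machine (with its dead hay_palabra_digitos branch and vacuous per-word uppercase reset) by two independent declarative scans: all characters valid, and no two adjacent characters both uppercase.
import Mathlib
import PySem

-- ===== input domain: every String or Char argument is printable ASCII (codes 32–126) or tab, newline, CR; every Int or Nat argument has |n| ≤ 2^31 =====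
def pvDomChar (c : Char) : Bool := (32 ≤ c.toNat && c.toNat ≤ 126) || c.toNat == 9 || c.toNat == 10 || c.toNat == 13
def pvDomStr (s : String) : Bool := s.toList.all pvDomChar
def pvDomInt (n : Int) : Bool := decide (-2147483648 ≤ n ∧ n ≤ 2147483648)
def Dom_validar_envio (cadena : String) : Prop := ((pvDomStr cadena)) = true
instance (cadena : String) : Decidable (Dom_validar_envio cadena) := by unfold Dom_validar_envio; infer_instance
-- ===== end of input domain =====

-- B replaces A's stateful single-pass flag machine by two independent boolean scans
-- (all characters valid; no two adjacent uppercase) — objective: simpler.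


-- ===== PORT A =====
-- literal port of A's loop: state (hay_mayuscula, hay_letra, hay_palabra_digitos)
def validarLoopA : List Char → Bool → Bool → Bool → Bool
  | [], _, _, _ => true
  | c :: cs, hay_mayuscula, hay_letra, hay_palabra_digitos =>
    if c ≠ ' ' ∧ c ≠ '.' then
      if ¬ (PySem.Chars.isdigit c) ∧ ¬ (PySem.Chars.isalpha c) then false
      else if hay_mayuscula ∧ PySem.Chars.isupper c then false
      else
        -- hay_mayuscula := False; then set if upper
        validarLoopA cs (PySem.Chars.isupper c) (hay_letra || PySem.Chars.isalpha c) hay_palabra_digitos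
    else
      -- separator: update hay_palabra_digitos, reset the word flags
      validarLoopA cs false false (hay_palabra_digitos || !hay_letra)

def validar_envio (cadena : String) : Bool :=
  validarLoopA cadena.toList false false false

-- ===== PORT B =====
def validar_envio_alt (cadena : String) : Bool :=
  let l := cadena.toList
  if ¬ (l.all fun c => PySem.Chars.isdigit c || PySem.Chars.isalpha c || c == ' ' || c == '.') then
    false
  else
    !((l.zip l.tail).any fun p => PySem.Chars.isupper p.1 && PySem.Chars.isupper p.2)

-- ===== PRECONDITION & SPEC =====
def Spec_validar_envio (cadena : String) (out : Bool) : Prop := out = validar_envio_alt cadena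
instance (cadena : String) (out : Bool) : Decidable (Spec_validar_envio cadena out) := by unfold Spec_validar_envio; infer_instance

-- ===== CLAIM (what is proved, stated in full; the proofs are below) =====
def Claim_equal_validar_envio : Prop := ∀ (cadena : String), Dom_validar_envio cadena → Spec_validar_envio cadena (validar_envio cadena)

-- ===== LEMMAS AND PROOFS =====

def pvOkChar (c : Char) : Bool :=
  PySem.Chars.isdigit c || PySem.Chars.isalpha c || c == ' ' || c == '.'

def pvHeadUpper : List Char → Bool
  | [] => false
  | c :: _ => PySem.Chars.isupper c

def pvNoAdj (l : List Char) : Bool :=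
  !((l.zip l.tail).any fun p => PySem.Chars.isupper p.1 && PySem.Chars.isupper p.2)

lemma pvSepNotUpper (c : Char) (h : c = ' ' ∨ c = '.') : PySem.Chars.isupper c = false := by
  rcases h with h | h <;> subst h <;> decide

lemma validarLoopA_eq (l : List Char) : ∀ (m hl hp : Bool),
    validarLoopA l m hl hp =
      (l.all pvOkChar && !(m && pvHeadUpper l) && pvNoAdj l) := by
  induction l with
  | nil => intro m hl hp; simp [validarLoopA, pvNoAdj, pvHeadUpper]
  | cons c cs ih =>
    intro m hl hp
    by_cases hsep : c ≠ ' ' ∧ c ≠ '.'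
    · rw [validarLoopA]
      simp only [if_pos hsep]
      by_cases hbad : ¬ (PySem.Chars.isdigit c) ∧ ¬ (PySem.Chars.isalpha c)
      · rw [if_pos hbad]
        have h1 : PySem.Chars.isdigit c = false := by simpa using hbad.1
        have h2 : PySem.Chars.isalpha c = false := by simpa using hbad.2
        have h3 : (c == ' ') = false := by rw [beq_eq_false_iff_ne]; exact hsep.1
        have h4 : (c == '.') = false := by rw [beq_eq_false_iff_ne]; exact hsep.2
        simp [pvOkChar, h1, h2, h3, h4]
      · rw [if_neg hbad]
        have hok : pvOkChar c = true := by
          unfold pvOkChar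
          rcases not_and_or.mp hbad with h | h <;> simp at h <;> simp [h]
        by_cases hmu : m ∧ PySem.Chars.isupper c
        · rw [if_pos hmu]
          simp [pvHeadUpper, hmu.1, hmu.2]
        · rw [if_neg hmu]
          rw [ih]
          cases cs with
          | nil =>
            cases hm : m <;> cases hu : PySem.Chars.isupper c <;>
              simp_all [pvNoAdj, pvHeadUpper]
          | cons d ds =>
            simp only [pvNoAdj, pvHeadUpper, List.tail, List.zip_cons_cons, List.any_cons,
              List.all_cons, hok]
            cases hm : m <;> cases hu : PySem.Chars.isupper c <;>
              cases hd : PySem.Chars.isupper d <;> simp_all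
    · rw [validarLoopA]
      simp only [if_neg hsep]
      rw [ih]
      have hc : c = ' ' ∨ c = '.' := by
        by_contra h; push Not at h; exact hsep ⟨h.1, h.2⟩
      have hu : PySem.Chars.isupper c = false := pvSepNotUpper c hc
      have hok : pvOkChar c = true := by
        rcases hc with h | h <;> subst h <;> decide
      cases cs with
      | nil => cases m <;> simp_all [pvNoAdj, pvHeadUpper]
      | cons d ds =>
        simp only [pvNoAdj, pvHeadUpper, List.tail, List.zip_cons_cons, List.any_cons,
          List.all_cons, hok, hu]
        cases m <;> cases PySem.Chars.isupper d <;> simp_all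

-- ===== VERDICT (by name: the statement is the Claim_ definition above) =====
theorem validar_envio_spec : Claim_equal_validar_envio := by
  intro cadena _
  unfold Spec_validar_envio validar_envio validar_envio_alt
  rw [validarLoopA_eq]
  have hall : (cadena.toList.all fun c =>
      PySem.Chars.isdigit c || PySem.Chars.isalpha c || c == ' ' || c == '.')
      = cadena.toList.all pvOkChar := rfl
  simp only [hall, Bool.false_and, Bool.not_false, Bool.and_true]
  cases h : cadena.toList.all pvOkChar <;> simp [pvNoAdj]
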